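-- pv_equiv track=rewrite | github.com/Haoyi-Zhang/WatermarkScope | projects/CodeMarkBench/codemarkbench/validation.py | _trim_to_first_standalone_block
-- ===== SOURCE A (Python) =====
-- import textwrap
--
-- STANDALONE_CODE_PREFIXES = (
--     "def ",
--     "class ",
--     "from ",
--     "import ",
--     "@",
--     "package ",
--     "public ",
--     "private ",
--     "protected ",
--     "func ",
--     "#include",
--     "using ",
--     "fn ",
-- )
--
-- def _split_source_lines(text: str) -> list[str]:
--     return str(text or "").replace("\r\n", "\n").replace("\r", "\n").split("\n")
--
-- def _dedent_source(text: str) -> str: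
--     return textwrap.dedent(str(text or "")).lstrip("\n")
--
-- def _trim_to_first_standalone_block(source: str) -> str:
--     for candidate in (str(source or ""), _dedent_source(source)):
--         lines = _split_source_lines(candidate)
--         for index, line in enumerate(lines):
--             if not line.strip():
--                 continue
--             stripped = line.lstrip()
--             if not line.startswith((" ", "\t")) and stripped.startswith(STANDALONE_CODE_PREFIXES):
--                 return "\n".join(lines[index:]).lstrip("\n")
--     return source
-- ===== SOURCE B (Python) =====
-- import textwrap
--
-- STANDALONE_CODE_PREFIXES = (
--     "def ",
--     "class ",
--     "from ",
--     "import ",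
--     "@",
--     "package ",
--     "public ",
--     "private ",
--     "protected ",
--     "func ",
--     "#include",
--     "using ",
--     "fn ",
-- )
--
--
-- def _normalize_newlines(text):
--     # one left-to-right pass: "\r\n" and "\r" each become a single "\n"
--     out = []
--     i = 0
--     n = len(text)
--     while i < n:
--         if text[i] == "\r":
--             out.append("\n")
--             i += 2 if i + 1 < n and text[i + 1] == "\n" else 1
--         else:
--             out.append(text[i])
--             i += 1
--     return "".join(out)
--
--
-- def _find_block(text):
--     # single character scan with an at-line-start flag; no line splitting
--     norm = _normalize_newlines(text)
--     at_line_start = True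
--     for i, c in enumerate(norm):
--         if at_line_start and any(norm.startswith(p, i) for p in STANDALONE_CODE_PREFIXES):
--             return norm[i:]
--         at_line_start = c == "\n"
--     return None
--
--
-- def _trim_to_first_standalone_block(source: str) -> str:
--     src = str(source or "")
--     hit = _find_block(src)
--     if hit is None:
--         hit = _find_block(textwrap.dedent(src).lstrip("\n"))
--     return src if hit is None else hit
-- ===== Notes on version B (the rewrite author's own statement) =====
-- stated objective: alternative
-- what changed: A splits each candidate into lines and runs nested per-line strip/lstrip/startswith loops re-joining the kept tail; B never splits: it normalizes newlines in one explicit index pass and then makes a single character scan with an at-line-start flag, returning the suffix at the first line start where a prefix matches literally.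
import Mathlib
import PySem

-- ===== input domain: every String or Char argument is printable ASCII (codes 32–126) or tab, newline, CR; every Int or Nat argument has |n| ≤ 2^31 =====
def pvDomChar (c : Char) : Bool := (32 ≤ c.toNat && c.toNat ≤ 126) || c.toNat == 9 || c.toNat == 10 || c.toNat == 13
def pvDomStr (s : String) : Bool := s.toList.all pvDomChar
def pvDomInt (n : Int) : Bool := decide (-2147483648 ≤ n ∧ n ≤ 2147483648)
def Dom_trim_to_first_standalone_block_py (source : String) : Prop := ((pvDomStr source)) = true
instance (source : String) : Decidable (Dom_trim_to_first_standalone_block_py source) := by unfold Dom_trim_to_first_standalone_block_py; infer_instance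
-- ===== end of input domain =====

-- B replaces A's per-candidate line split + nested per-line strip/startswith loops + join by a
-- one-pass newline normalizer and a single character scan with an at-line-start flag (alternative).

-- ===== PORT A =====
def pvPrefixes : List (List Char) :=
  ["def ".toList, "class ".toList, "from ".toList, "import ".toList, "@".toList,
   "package ".toList, "public ".toList, "private ".toList, "protected ".toList,
   "func ".toList, "#include".toList, "using ".toList, "fn ".toList]

-- A's text.replace("\r\n", "\n").replace("\r", "\n")
def pvNormalize (cs : List Char) : List Char :=
  PySem.Chars.replace (PySem.Chars.replace cs ['\r', '\n'] ['\n']) ['\r'] ['\n']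

-- _split_source_lines
def pvSplitSourceLines (cs : List Char) : List (List Char) :=
  PySem.Chars.splitOn (pvNormalize cs) ['\n']

-- textwrap.dedent, transliterated per-line (regex sub/findall become per-line operations w.r.t. '\n';
-- exact — validated against CPython's textwrap.dedent); shared: both Pythons call textwrap.dedent.
def pvIsIndentChar (c : Char) : Bool := c == ' ' || c == '\t'
def pvCommonPrefix : List Char → List Char → List Char
  | a :: as, b :: bs => if a = b then a :: pvCommonPrefix as bs else []
  | _, _ => []
def pvMarginStep (margin : Option (List Char)) (ind : List Char) : Option (List Char) :=
  match margin with
  | none => some ind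
  | some m =>
    if m.isPrefixOf ind then some m
    else if ind.isPrefixOf m then some ind
    else some (pvCommonPrefix m ind)
def pvDedent (cs : List Char) : List Char :=
  let lines0 := PySem.Chars.splitOn cs ['\n']
  let lines := lines0.map (fun l => if !l.isEmpty && l.all pvIsIndentChar then [] else l)
  let indents := (lines.filter (fun l => !l.isEmpty)).map (fun l => l.takeWhile pvIsIndentChar)
  match indents.foldl pvMarginStep none with
  | some (m :: ms) =>
      PySem.Chars.join ['\n']
        (lines.map (fun l => if (m :: ms).isPrefixOf l then l.drop (m :: ms).length else l))
  | _ => PySem.Chars.join ['\n'] lines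

-- s.lstrip("\n"): drop leading chars from the set {'\n'} (exact)
def pvLstripNl (cs : List Char) : List Char := cs.dropWhile (fun c => c == '\n')

-- _dedent_source (shared: both Pythons compute textwrap.dedent(src).lstrip("\n"))
def pvDedentSource (cs : List Char) : List Char := pvLstripNl (pvDedent cs)

-- the 'for index, line in enumerate(lines)' loop of A
def pvAScan : List (List Char) → Option (List Char)
  | [] => none
  | line :: rest =>
    if PySem.Chars.strip line = [] then pvAScan rest
    else if (!(PySem.Chars.startswith line [' '] || PySem.Chars.startswith line ['\t'])
             && pvPrefixes.any (fun p => PySem.Chars.startswith (PySem.Chars.lstrip line) p)) then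
      some (pvLstripNl (PySem.Chars.join ['\n'] (line :: rest)))
    else pvAScan rest

def trim_to_first_standalone_block_py (source : String) : String :=
  match pvAScan (pvSplitSourceLines source.toList) with
  | some r => String.ofList r
  | none =>
    match pvAScan (pvSplitSourceLines (pvDedentSource source.toList)) with
    | some r => String.ofList r
    | none => source

-- ===== PORT B =====
-- _normalize_newlines: one index pass; "\r\n" and "\r" each become a single "\n"
def pvNorm2 : List Char → List Char
  | [] => []
  | [c] => if c = '\r' then ['\n'] else [c]
  | c :: d :: t =>
    if c = '\r' then
      if d = '\n' then '\n' :: pvNorm2 t else '\n' :: pvNorm2 (d :: t)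
    else c :: pvNorm2 (d :: t)

-- _find_block's enumerate loop: a single scan carrying the at-line-start flag
def pvBScan : List Char → Bool → Option (List Char)
  | [], _ => none
  | c :: t, atStart =>
    if atStart && pvPrefixes.any (fun p => p.isPrefixOf (c :: t)) then some (c :: t)
    else pvBScan t (c == '\n')

-- _find_block
def pvFindBlock (cs : List Char) : Option (List Char) := pvBScan (pvNorm2 cs) true

def trim_to_first_standalone_block_py_alt (source : String) : String :=
  let hit :=
    match pvFindBlock source.toList with
    | some h => some h
    | none => pvFindBlock (pvDedentSource source.toList)
  match hit with
  | some h => String.ofList h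
  | none => source

-- ===== PRECONDITION & SPEC =====
def Spec_trim_to_first_standalone_block_py (source : String) (out : String) : Prop := out = trim_to_first_standalone_block_py_alt source
instance (source : String) (out : String) : Decidable (Spec_trim_to_first_standalone_block_py source out) := by unfold Spec_trim_to_first_standalone_block_py; infer_instance

-- ===== CLAIM (what is proved, stated in full; the proofs are below) =====
def Claim_equal_trim_to_first_standalone_block_py : Prop := ∀ (source : String), Dom_trim_to_first_standalone_block_py source → Spec_trim_to_first_standalone_block_py source (trim_to_first_standalone_block_py source)

-- ===== LEMMAS AND PROOFS =====

-- proof-side abbreviation for "some prefix matches right here"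
def pvMatchHere (cs : List Char) : Bool := pvPrefixes.any (fun p => p.isPrefixOf cs)

-- proof-side bridge: the search expressed as a jump from newline to newline
def pvBSearch (cs : List Char) : Option (List Char) :=
  if pvMatchHere cs then some cs
  else
    match h : cs.dropWhile (fun c => c != '\n') with
    | [] => none
    | _ :: rest => pvBSearch rest
termination_by cs.length
decreasing_by
  have hle := List.length_dropWhile_le (fun c => c != '\n') cs
  rw [h] at hle
  simp at hle
  omega

-- chars that can appear after pvNormalize of a Dom string: tab, newline, or printable ASCII (no CR)
def pvGoodChar (c : Char) : Bool := c == '\t' || c == '\n' || (32 ≤ c.toNat && c.toNat ≤ 126)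

-- reference shape of PySem.Chars.splitOn · ['\n']
def pvSplitAux (cur : List Char) : List Char → List (List Char)
  | [] => [cur.reverse]
  | c :: t => if c = '\n' then cur.reverse :: pvSplitAux [] t else pvSplitAux (c :: cur) t

theorem pvSplitOn_go_spec (fuel : Nat) (l cur : List Char) (acc : List (List Char))
    (h : l.length ≤ fuel) :
    PySem.Chars.splitOn.go ['\n'] fuel l cur acc = acc.reverse ++ pvSplitAux cur l := by
  induction fuel generalizing l cur acc with
  | zero =>
    have : l = [] := List.length_eq_zero_iff.mp (Nat.le_zero.mp h)
    subst this
    rw [PySem.Chars.splitOn.go]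
    simp [pvSplitAux]
  | succ n ih =>
    cases l with
    | nil => rw [PySem.Chars.splitOn.go] <;> simp [pvSplitAux]
    | cons c rest =>
      rw [PySem.Chars.splitOn.go]
      by_cases hc : c = '\n'
      · subst hc
        have hpre : List.isPrefixOf ['\n'] ('\n' :: rest) = true := by simp [List.isPrefixOf]
        simp only [hpre, if_true, List.length_cons, List.length_nil, List.drop_succ_cons, List.drop_zero]
        rw [ih rest [] (cur.reverse :: acc) (by simpa using h)]
        simp [pvSplitAux]
      · have hpre : List.isPrefixOf ['\n'] (c :: rest) = false := by
          simp [List.isPrefixOf]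
          exact fun hh => absurd hh.symm hc
        simp only [hpre, if_false, Bool.false_eq_true]
        rw [ih rest (c :: cur) acc (by simpa using h)]
        simp [pvSplitAux, hc]

theorem pvSplitOn_nl_eq (cs : List Char) :
    PySem.Chars.splitOn cs ['\n'] = pvSplitAux [] cs := by
  unfold PySem.Chars.splitOn
  rw [pvSplitOn_go_spec _ _ _ _ (by omega)]
  simp

theorem pvSplitAux_no_nl (cur cs : List Char) (h : '\n' ∉ cs) :
    pvSplitAux cur cs = [cur.reverse ++ cs] := by
  induction cs generalizing cur with
  | nil => simp [pvSplitAux]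
  | cons c t ih =>
    have hc : c ≠ '\n' := fun hh => h (hh ▸ List.mem_cons_self)
    rw [pvSplitAux, if_neg hc, ih (c :: cur) (fun hm => h (List.mem_cons_of_mem _ hm))]
    simp

theorem pvSplitAux_append (cur l r : List Char) (h : '\n' ∉ l) :
    pvSplitAux cur (l ++ '\n' :: r) = (cur.reverse ++ l) :: pvSplitAux [] r := by
  induction l generalizing cur with
  | nil => simp [pvSplitAux]
  | cons c t ih =>
    have hc : c ≠ '\n' := fun hh => h (hh ▸ List.mem_cons_self)
    rw [List.cons_append, pvSplitAux, if_neg hc, ih (c :: cur) (fun hm => h (List.mem_cons_of_mem _ hm))]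
    simp

theorem pvSplitAux_ne_nil_aux (cur cs : List Char) : pvSplitAux cur cs ≠ [] := by
  induction cs generalizing cur with
  | nil => simp [pvSplitAux]
  | cons c t ih =>
    rw [pvSplitAux]
    split
    · simp
    · exact ih _

theorem pvJoin_splitAux (cur cs : List Char) :
    PySem.Chars.join ['\n'] (pvSplitAux cur cs) = cur.reverse ++ cs := by
  induction cs generalizing cur with
  | nil => simp [pvSplitAux, PySem.Chars.join_singleton]
  | cons c t ih =>
    by_cases hc : c = '\n'
    · subst hc
      rw [pvSplitAux, if_pos rfl]
      have h2 := ih ([] : List Char)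
      cases h : pvSplitAux ([] : List Char) t with
      | nil => exact absurd h (pvSplitAux_ne_nil_aux [] t)
      | cons x xs =>
        rw [h] at h2
        rw [PySem.Chars.join_cons_cons, h2]
        simp
    · rw [pvSplitAux, if_neg hc, ih (c :: cur)]
      simp

theorem pvMem_splitAux (cur cs piece : List Char) (c : Char)
    (hp : piece ∈ pvSplitAux cur cs) (hc : c ∈ piece) : c ∈ cur ∨ c ∈ cs := by
  induction cs generalizing cur piece with
  | nil =>
    simp [pvSplitAux] at hp; subst hp
    exact Or.inl (List.mem_reverse.mp hc)
  | cons d t ih =>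
    rw [pvSplitAux] at hp
    split at hp
    · rcases List.mem_cons.mp hp with h1 | h1
      · subst h1; exact Or.inl (List.mem_reverse.mp hc)
      · rcases ih [] piece h1 hc with h2 | h2
        · simp at h2
        · exact Or.inr (List.mem_cons_of_mem _ h2)
    · rcases ih (d :: cur) piece hp hc with h2 | h2
      · rcases List.mem_cons.mp h2 with h3 | h3
        · exact Or.inr (h3 ▸ List.mem_cons_self)
        · exact Or.inl h3
      · exact Or.inr (List.mem_cons_of_mem _ h2)

-- the concrete prefix list: nonempty, no '\n' inside, head not a space character
theorem pvPrefixes_facts :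
    ∀ p ∈ pvPrefixes, p ≠ [] ∧ '\n' ∉ p ∧ PySem.Chars.isspace (p.headD 'x') = false := by
  decide

theorem pvStrip_eq_nil_iff (l : List Char) :
    PySem.Chars.strip l = [] ↔ ∀ c ∈ l, PySem.Chars.isspace c = true := by
  simp only [PySem.Chars.strip, PySem.Chars.rstrip, PySem.Chars.lstrip,
    List.reverse_eq_nil_iff, List.dropWhile_eq_nil_iff, List.mem_reverse]
  constructor
  · intro h c hc
    rcases List.mem_append.mp
        ((List.takeWhile_append_dropWhile (p := PySem.Chars.isspace) (l := l)) ▸ hc) with h1 | h1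
    · exact List.mem_takeWhile_imp h1
    · exact h c h1
  · intro h c hc
    exact h c ((List.dropWhile_sublist _).mem hc)

theorem pvChar_eq_of_toNat_eq {c d : Char} (h : c.toNat = d.toNat) : c = d := by
  have h1 := Char.ofNat_toNat c
  rw [← h1, h, Char.ofNat_toNat]

theorem pvGood_not_space (c : Char) (hg : pvGoodChar c = true)
    (h1 : c ≠ ' ') (h2 : c ≠ '\t') (h3 : c ≠ '\n') :
    PySem.Chars.isspace c = false := by
  have e1 : c.toNat ≠ 32 := fun hh => h1 (pvChar_eq_of_toNat_eq (by simpa using hh))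
  have hg' : 32 ≤ c.toNat ∧ c.toNat ≤ 126 := by
    simp only [pvGoodChar, Bool.or_eq_true, beq_iff_eq, Bool.and_eq_true, decide_eq_true_eq] at hg
    rcases hg with (hh | hh) | hh
    · exact absurd hh h2
    · exact absurd hh h3
    · exact hh
  simp only [PySem.Chars.isspace]
  simp only [Bool.or_eq_false_iff, Bool.and_eq_false_iff, decide_eq_false_iff_not]
  omega

theorem pvPrefix_through_newline (p l r : List Char) (hnp : '\n' ∉ p)
    (h : p.isPrefixOf (l ++ '\n' :: r)) : p.isPrefixOf l := by
  induction p generalizing l with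
  | nil => simp [List.isPrefixOf]
  | cons a p' ih =>
    cases l with
    | nil =>
      simp only [List.nil_append, List.isPrefixOf] at h
      rcases Bool.and_eq_true_iff.mp h with ⟨ha, -⟩
      exact absurd (beq_iff_eq.mp ha) (fun hh => hnp (hh ▸ List.mem_cons_self))
    | cons b l' =>
      simp only [List.cons_append, List.isPrefixOf] at h ⊢
      rcases Bool.and_eq_true_iff.mp h with ⟨ha, hrest⟩
      exact Bool.and_eq_true_iff.mpr ⟨ha, ih l' (fun hm => hnp (List.mem_cons_of_mem _ hm)) hrest⟩

theorem pvReplace_single_go (fuel : Nat) (l acc : List Char) (h : l.length ≤ fuel) :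
    PySem.Chars.replace.go ['\r'] ['\n'] fuel l acc =
      acc.reverse ++ l.map (fun c => if c = '\r' then '\n' else c) := by
  induction fuel generalizing l acc with
  | zero =>
    have : l = [] := List.length_eq_zero_iff.mp (Nat.le_zero.mp h)
    subst this
    rw [PySem.Chars.replace.go]
    simp
  | succ n ih =>
    cases l with
    | nil => rw [PySem.Chars.replace.go] <;> simp
    | cons c rest =>
      rw [PySem.Chars.replace.go]
      by_cases hc : c = '\r'
      · subst hc
        have hpre : List.isPrefixOf ['\r'] ('\r' :: rest) = true := by simp [List.isPrefixOf]
        simp only [hpre, if_true, List.length_cons, List.length_nil, List.drop_succ_cons, List.drop_zero]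
        rw [ih rest _ (by simpa using h)]
        simp
      · have hpre : List.isPrefixOf ['\r'] (c :: rest) = false := by
          simp [List.isPrefixOf]
          exact fun hh => absurd hh.symm hc
        simp only [hpre, if_false, Bool.false_eq_true]
        rw [ih rest _ (by simpa using h)]
        simp [hc]

theorem pvReplace_single (s : List Char) :
    PySem.Chars.replace s ['\r'] ['\n'] = s.map (fun c => if c = '\r' then '\n' else c) := by
  rw [PySem.Chars.replace]
  simp only [List.isEmpty_cons, Bool.false_eq_true, if_false]
  rw [pvReplace_single_go s.length s [] (le_refl _)]
  simp

-- reference shape of the "\r\n" -> "\n" pass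
def pvRepl1 : List Char → List Char
  | [] => []
  | [c] => [c]
  | c :: d :: t => if c = '\r' ∧ d = '\n' then '\n' :: pvRepl1 t else c :: pvRepl1 (d :: t)

theorem pvReplace_crlf_go (fuel : Nat) (l acc : List Char) (h : l.length ≤ fuel) :
    PySem.Chars.replace.go ['\r', '\n'] ['\n'] fuel l acc = acc.reverse ++ pvRepl1 l := by
  induction fuel generalizing l acc with
  | zero =>
    have : l = [] := List.length_eq_zero_iff.mp (Nat.le_zero.mp h)
    subst this
    rw [PySem.Chars.replace.go]
    simp [pvRepl1]
  | succ n ih =>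
    cases l with
    | nil => rw [PySem.Chars.replace.go] <;> simp [pvRepl1]
    | cons c rest =>
      rw [PySem.Chars.replace.go]
      cases hpre : List.isPrefixOf ['\r', '\n'] (c :: rest) with
      | true =>
        cases rest with
        | nil => simp [List.isPrefixOf] at hpre
        | cons d t =>
          simp only [List.isPrefixOf, List.isPrefixOf_nil_left, Bool.and_true,
            Bool.and_eq_true, beq_iff_eq] at hpre
          obtain ⟨hc, hd⟩ := hpre
          subst hc; subst hd
          have hpre2 : List.isPrefixOf ['\r', '\n'] ('\r' :: '\n' :: t) = true := by
            simp [List.isPrefixOf]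
          simp only [hpre2, if_true]
          rw [ih _ _ (by simp at h ⊢; omega)]
          simp [pvRepl1]
      | false =>
        simp only [hpre, Bool.false_eq_true, if_false]
        rw [ih rest _ (by simpa using h)]
        cases rest with
        | nil => simp [pvRepl1]
        | cons d t =>
          have : ¬ (c = '\r' ∧ d = '\n') := by
            rintro ⟨h1, h2⟩
            subst h1; subst h2
            simp [List.isPrefixOf] at hpre
          simp [pvRepl1, this]

theorem pvReplace_crlf (s : List Char) :
    PySem.Chars.replace s ['\r', '\n'] ['\n'] = pvRepl1 s := by
  rw [PySem.Chars.replace]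
  simp only [List.isEmpty_cons, Bool.false_eq_true, if_false]
  rw [pvReplace_crlf_go s.length s [] (le_refl _)]
  simp

-- B's one-pass normalizer equals A's replace chain
theorem pvNorm2_eq_aux (n : Nat) (cs : List Char) (h : cs.length ≤ n) :
    pvNorm2 cs = (pvRepl1 cs).map (fun c => if c = '\r' then '\n' else c) := by
  induction n generalizing cs with
  | zero =>
    have : cs = [] := List.length_eq_zero_iff.mp (Nat.le_zero.mp h)
    subst this
    simp [pvNorm2, pvRepl1]
  | succ n ih =>
    cases cs with
    | nil => simp [pvNorm2, pvRepl1]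
    | cons c rest =>
      cases rest with
      | nil =>
        by_cases hc : c = '\r' <;> simp [pvNorm2, pvRepl1, hc]
      | cons d t =>
        by_cases hc : c = '\r'
        · subst hc
          by_cases hd : d = '\n'
          · subst hd
            have e1 : pvRepl1 ('\r' :: '\n' :: t) = '\n' :: pvRepl1 t := by
              rw [pvRepl1]; simp
            have e2 : pvNorm2 ('\r' :: '\n' :: t) = '\n' :: pvNorm2 t := by
              rw [pvNorm2]; simp
            rw [e1, e2, ih t (by simp at h ⊢; omega)]
            simp
          · have e1 : pvRepl1 ('\r' :: d :: t) = '\r' :: pvRepl1 (d :: t) := by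
              rw [pvRepl1]; simp [hd]
            have e2 : pvNorm2 ('\r' :: d :: t) = '\n' :: pvNorm2 (d :: t) := by
              rw [pvNorm2]; simp [hd]
            rw [e1, e2, ih (d :: t) (by simp at h ⊢; omega)]
            simp
        · have e1 : pvRepl1 (c :: d :: t) = c :: pvRepl1 (d :: t) := by
            rw [pvRepl1]; simp [hc]
          have e2 : pvNorm2 (c :: d :: t) = c :: pvNorm2 (d :: t) := by
            rw [pvNorm2]; simp [hc]
          rw [e1, e2, ih (d :: t) (by simp at h ⊢; omega)]
          simp [hc]

theorem pvNorm2_eq_normalize (cs : List Char) : pvNorm2 cs = pvNormalize cs := by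
  rw [pvNormalize, pvReplace_crlf, pvReplace_single,
    pvNorm2_eq_aux cs.length cs (le_refl _)]

theorem pvMem_replace_go (old new : List Char) (fuel : Nat) (l acc : List Char) (c : Char)
    (h : c ∈ PySem.Chars.replace.go old new fuel l acc) : c ∈ acc ∨ c ∈ l ∨ c ∈ new := by
  induction fuel generalizing l acc with
  | zero =>
    rw [PySem.Chars.replace.go] at h
    rcases List.mem_append.mp h with h1 | h1
    · exact Or.inl (List.mem_reverse.mp h1)
    · exact Or.inr (Or.inl h1)
  | succ n ih =>
    cases l with
    | nil =>
      rw [PySem.Chars.replace.go] at h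
      · exact Or.inl (List.mem_reverse.mp h)
      · simp
    | cons d rest =>
      rw [PySem.Chars.replace.go] at h
      split at h
      · rcases ih _ _ h with h1 | h1 | h1
        · rcases List.mem_append.mp h1 with h2 | h2
          · exact Or.inr (Or.inr (List.mem_reverse.mp h2))
          · exact Or.inl h2
        · exact Or.inr (Or.inl (List.mem_of_mem_drop h1))
        · exact Or.inr (Or.inr h1)
      · rcases ih _ _ h with h1 | h1 | h1
        · rcases List.mem_cons.mp h1 with h2 | h2
          · exact Or.inr (Or.inl (h2 ▸ List.mem_cons_self))
          · exact Or.inl h2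
        · exact Or.inr (Or.inl (List.mem_cons_of_mem _ h1))
        · exact Or.inr (Or.inr h1)

theorem pvMem_replace (s old new : List Char) (c : Char)
    (h : c ∈ PySem.Chars.replace s old new) : c ∈ s ∨ c ∈ new := by
  rw [PySem.Chars.replace] at h
  split at h
  · rcases List.mem_append.mp h with h1 | h1
    · exact Or.inr h1
    · rcases List.mem_flatMap.mp h1 with ⟨d, hd, hc⟩
      rcases List.mem_cons.mp hc with h2 | h2
      · exact Or.inl (h2 ▸ hd)
      · exact Or.inr h2
  · rcases pvMem_replace_go old new _ _ _ _ h with h1 | h1 | h1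
    · simp at h1
    · exact Or.inl h1
    · exact Or.inr h1

theorem pvNormalize_good (cs : List Char) (h : ∀ c ∈ cs, pvDomChar c = true) :
    ∀ c ∈ pvNormalize cs, pvGoodChar c = true := by
  intro c hc
  rw [pvNormalize, pvReplace_single] at hc
  rcases List.mem_map.mp hc with ⟨d, hd, hcd⟩
  rcases pvMem_replace _ _ _ _ hd with h1 | h1
  · have hdom := h d h1
    by_cases hr : d = '\r'
    · subst hr; rw [← hcd]; decide
    · rw [← hcd]
      simp only [hr, if_false]
      simp only [pvDomChar, Bool.or_eq_true, Bool.and_eq_true, decide_eq_true_eq,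
        beq_iff_eq] at hdom
      simp only [pvGoodChar, Bool.or_eq_true, beq_iff_eq, Bool.and_eq_true, decide_eq_true_eq]
      have hr' : d.toNat ≠ 13 := fun hh => hr (pvChar_eq_of_toNat_eq (by simpa using hh))
      rcases hdom with ((hh | hh) | hh) | hh
      · exact Or.inr ⟨hh.1, hh.2⟩
      · exact Or.inl (Or.inl (pvChar_eq_of_toNat_eq (by simpa using hh)))
      · exact Or.inl (Or.inr (pvChar_eq_of_toNat_eq (by simpa using hh)))
      · exact absurd hh hr'
  · rcases List.mem_cons.mp h1 with h2 | h2
    · rw [← hcd, h2]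
      decide
    · simp at h2

theorem pvMem_join_of_pieces (parts : List (List Char)) (cs : List Char)
    (hsub : ∀ p ∈ parts, ∀ x ∈ p, x ∈ cs) (c : Char)
    (h : c ∈ PySem.Chars.join ['\n'] parts) : c ∈ cs ∨ c = '\n' := by
  induction parts with
  | nil => rw [PySem.Chars.join_nil] at h; exact absurd h List.not_mem_nil
  | cons x t ih =>
    cases t with
    | nil =>
      rw [PySem.Chars.join_singleton] at h
      exact Or.inl (hsub x List.mem_cons_self c h)
    | cons y tt =>
      rw [PySem.Chars.join_cons_cons] at h
      rcases List.mem_append.mp h with h1 | h1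
      · rcases List.mem_append.mp h1 with h2 | h2
        · exact Or.inl (hsub x List.mem_cons_self c h2)
        · rcases List.mem_cons.mp h2 with h3 | h3
          · exact Or.inr h3
          · simp at h3
      · exact ih (fun p hp => hsub p (List.mem_cons_of_mem _ hp)) h1

theorem pvMem_dedent (cs : List Char) (c : Char)
    (h : c ∈ pvDedent cs) : c ∈ cs ∨ c = '\n' := by
  simp only [pvDedent] at h
  split at h
  · refine pvMem_join_of_pieces _ cs ?_ c h
    intro p hp x hx
    rcases List.mem_map.mp hp with ⟨q, hq, hqp⟩
    rcases List.mem_map.mp hq with ⟨q0, hq0, hq0q⟩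
    have hxq : x ∈ q := by
      rw [← hqp] at hx
      split at hx
      · exact List.mem_of_mem_drop hx
      · exact hx
    have hxq0 : x ∈ q0 := by
      rw [← hq0q] at hxq
      split at hxq
      · simp at hxq
      · exact hxq
    have := pvMem_splitAux [] cs q0 x (by rwa [← pvSplitOn_nl_eq]) hxq0
    simpa using this
  · refine pvMem_join_of_pieces _ cs ?_ c h
    intro p hp x hx
    rcases List.mem_map.mp hp with ⟨q0, hq0, hq0q⟩
    have hxq0 : x ∈ q0 := by
      rw [← hq0q] at hx
      split at hx
      · simp at hx
      · exact hx
    have := pvMem_splitAux [] cs q0 x (by rwa [← pvSplitOn_nl_eq]) hxq0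
    simpa using this

theorem pvMem_dedentSource (cs : List Char) (c : Char)
    (h : c ∈ pvDedentSource cs) : c ∈ cs ∨ c = '\n' := by
  rw [pvDedentSource, pvLstripNl] at h
  exact pvMem_dedent cs c ((List.dropWhile_sublist _).mem h)

-- the line condition of A reduced to "some prefix matches the raw line"
theorem pvLineCond_of_match (line : List Char) (hm : pvMatchHere line = true) :
    PySem.Chars.strip line ≠ [] ∧
    (PySem.Chars.startswith line [' '] || PySem.Chars.startswith line ['\t']) = false ∧
    pvPrefixes.any (fun p => PySem.Chars.startswith (PySem.Chars.lstrip line) p) = true := by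
  rcases List.any_eq_true.mp hm with ⟨p, hp, hpre⟩
  rcases pvPrefixes_facts p hp with ⟨hne, hnl, hhead⟩
  cases p with
  | nil => exact absurd rfl hne
  | cons a p' =>
    cases line with
    | nil => simp [List.isPrefixOf] at hpre
    | cons b t =>
      simp only [List.isPrefixOf] at hpre
      rcases Bool.and_eq_true_iff.mp hpre with ⟨hab, -⟩
      have hab' : a = b := beq_iff_eq.mp hab
      have hbs : PySem.Chars.isspace b = false := by
        rw [← hab']; simpa using hhead
      have hlstrip : PySem.Chars.lstrip (b :: t) = b :: t := by
        simp [PySem.Chars.lstrip, hbs]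
      refine ⟨?_, ?_, ?_⟩
      · intro hstrip
        have := (pvStrip_eq_nil_iff _).mp hstrip b List.mem_cons_self
        rw [hbs] at this; exact absurd this (by simp)
      · have hbsp : b ≠ ' ' := fun hh => by rw [hh] at hbs; exact absurd hbs (by decide)
        have hbtb : b ≠ '\t' := fun hh => by rw [hh] at hbs; exact absurd hbs (by decide)
        simp [PySem.Chars.startswith, List.isPrefixOf, Ne.symm hbsp, Ne.symm hbtb]
      · refine List.any_eq_true.mpr ⟨a :: p', hp, ?_⟩
        rw [hlstrip]
        simpa [PySem.Chars.startswith] using hpre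

theorem pvMatch_of_cond (line : List Char)
    (hnl : '\n' ∉ line) (hg : ∀ c ∈ line, pvGoodChar c = true)
    (hcond : (!(PySem.Chars.startswith line [' '] || PySem.Chars.startswith line ['\t'])
      && pvPrefixes.any (fun p => PySem.Chars.startswith (PySem.Chars.lstrip line) p)) = true) :
    pvMatchHere line = true := by
  rcases Bool.and_eq_true_iff.mp hcond with ⟨hns, hany⟩
  have hns' := Bool.not_eq_eq_eq_not.mp hns
  cases line with
  | nil =>
    rcases List.any_eq_true.mp hany with ⟨p, hp, hpre⟩
    rcases pvPrefixes_facts p hp with ⟨hne, -, -⟩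
    have : p = [] := by
      cases p with
      | nil => rfl
      | cons a q => simp [PySem.Chars.startswith, PySem.Chars.lstrip] at hpre
    exact absurd this hne
  | cons b t =>
    have hnsp : b ≠ ' ' := by
      intro hh; subst hh
      simp [PySem.Chars.startswith, List.isPrefixOf] at hns'
    have hntb : b ≠ '\t' := by
      intro hh; subst hh
      simp [PySem.Chars.startswith, List.isPrefixOf] at hns'
    have hnn : b ≠ '\n' := fun hh => hnl (hh ▸ List.mem_cons_self)
    have hbs : PySem.Chars.isspace b = false :=
      pvGood_not_space b (hg b List.mem_cons_self) hnsp hntb hnn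
    have hlstrip : PySem.Chars.lstrip (b :: t) = b :: t := by
      simp [PySem.Chars.lstrip, hbs]
    rw [hlstrip] at hany
    rcases List.any_eq_true.mp hany with ⟨p, hp, hpre⟩
    exact List.any_eq_true.mpr ⟨p, hp, by simpa [PySem.Chars.startswith] using hpre⟩

-- equation lemmas for the loops
theorem pvAScan_cons (line : List Char) (rest : List (List Char)) :
    pvAScan (line :: rest) =
      (if PySem.Chars.strip line = [] then pvAScan rest
       else if (!(PySem.Chars.startswith line [' '] || PySem.Chars.startswith line ['\t'])
                && pvPrefixes.any (fun p => PySem.Chars.startswith (PySem.Chars.lstrip line) p)) then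
         some (pvLstripNl (PySem.Chars.join ['\n'] (line :: rest)))
       else pvAScan rest) := rfl

theorem pvBSearch_pos (cs : List Char) (h : pvMatchHere cs = true) : pvBSearch cs = some cs := by
  rw [pvBSearch]
  simp [h]

theorem pvBSearch_neg_nil (cs : List Char) (h : pvMatchHere cs = false)
    (h2 : cs.dropWhile (fun c => c != '\n') = []) : pvBSearch cs = none := by
  rw [pvBSearch, if_neg (by simp [h])]
  split
  · rfl
  · rename_i c1 r1 heq
    rw [h2] at heq
    cases heq

theorem pvBSearch_neg_cons (cs : List Char) (c0 : Char) (rest : List Char)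
    (h : pvMatchHere cs = false)
    (h2 : cs.dropWhile (fun c => c != '\n') = c0 :: rest) : pvBSearch cs = pvBSearch rest := by
  rw [pvBSearch, if_neg (by simp [h])]
  split
  · rename_i heq
    rw [h2] at heq
    cases heq
  · rename_i c1 r1 heq
    rw [h2] at heq
    cases heq
    rfl

-- B's flag-carrying scan equals the newline-jumping search
theorem pvBScan_eq_aux (n : Nat) (cs : List Char) (h : cs.length ≤ n) :
    pvBScan cs true = pvBSearch cs ∧
    pvBScan cs false =
      (match cs.dropWhile (fun c => c != '\n') with
       | [] => none
       | _ :: r => pvBSearch r) := by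
  induction n generalizing cs with
  | zero =>
    have : cs = [] := List.length_eq_zero_iff.mp (Nat.le_zero.mp h)
    subst this
    refine ⟨?_, rfl⟩
    rw [pvBSearch_neg_nil [] (by decide) (by decide)]
    rfl
  | succ n ih =>
    cases cs with
    | nil =>
      refine ⟨?_, rfl⟩
      rw [pvBSearch_neg_nil [] (by decide) (by decide)]
      rfl
    | cons c t =>
      have ht := ih t (by simpa using h)
      constructor
      · cases hm : pvMatchHere (c :: t) with
        | true =>
          rw [pvBSearch_pos _ hm, pvBScan]
          have : (true && pvPrefixes.any (fun p => p.isPrefixOf (c :: t))) = true := by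
            simpa [pvMatchHere] using hm
          rw [if_pos this]
        | false =>
          rw [pvBScan]
          have hcond : (true && pvPrefixes.any (fun p => p.isPrefixOf (c :: t))) = false := by
            simpa [pvMatchHere] using hm
          rw [if_neg (by simp [hcond])]
          by_cases hc : c = '\n'
          · subst hc
            have hdrop : ('\n' :: t).dropWhile (fun c => c != '\n') = '\n' :: t := by
              simp [List.dropWhile_cons]
            rw [pvBSearch_neg_cons _ '\n' t hm hdrop]
            simpa using ht.1
          · have hdrop : (c :: t).dropWhile (fun x => x != '\n') = t.dropWhile (fun x => x != '\n') := by
              simp [List.dropWhile_cons, hc]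
            have hbeq : (c == '\n') = false := by simp [hc]
            rw [hbeq]
            rw [ht.2]
            cases h2 : t.dropWhile (fun x => x != '\n') with
            | nil => rw [pvBSearch_neg_nil _ hm (hdrop.trans h2)]
            | cons c0 r => rw [pvBSearch_neg_cons _ c0 r hm (hdrop.trans h2)]
      · rw [pvBScan]
        have : (false && pvPrefixes.any (fun p => p.isPrefixOf (c :: t))) = false := by simp
        rw [if_neg (by simp)]
        by_cases hc : c = '\n'
        · subst hc
          have hdrop : ('\n' :: t).dropWhile (fun c => c != '\n') = '\n' :: t := by
            simp [List.dropWhile_cons]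
          rw [hdrop]
          simpa using ht.1
        · have hbeq : (c == '\n') = false := by simp [hc]
          rw [hbeq, ht.2]
          have hdrop : (c :: t).dropWhile (fun x => x != '\n') = t.dropWhile (fun x => x != '\n') := by
            simp [List.dropWhile_cons, hc]
          rw [hdrop]

theorem pvFindBlock_eq (cs : List Char) :
    pvFindBlock cs = pvBSearch (pvNormalize cs) := by
  rw [pvFindBlock, pvNorm2_eq_normalize]
  exact (pvBScan_eq_aux (pvNormalize cs).length _ (le_refl _)).1

-- a found suffix starts with a prefix head, hence not with '\n': lstrip("\n") is a no-op there
theorem pvBSearch_matches (cs t : List Char) (h : pvBSearch cs = some t) :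
    pvMatchHere t = true := by
  induction cs using pvBSearch.induct with
  | case1 cs hm => rw [pvBSearch_pos cs hm] at h; cases h; exact ‹pvMatchHere t = true›
  | case2 cs hm hd => rw [pvBSearch_neg_nil cs (by simpa using hm) hd] at h; cases h
  | case3 cs hm c0 r hd ih =>
    rw [pvBSearch_neg_cons cs c0 r (by simpa using hm) hd] at h
    exact ih h

theorem pvLstripNl_of_match (t : List Char) (hm : pvMatchHere t = true) :
    pvLstripNl t = t := by
  rcases List.any_eq_true.mp hm with ⟨p, hp, hpre⟩
  rcases pvPrefixes_facts p hp with ⟨hne, hnl, -⟩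
  cases p with
  | nil => exact absurd rfl hne
  | cons a q =>
    cases t with
    | nil => simp [List.isPrefixOf] at hpre
    | cons b u =>
      simp only [List.isPrefixOf] at hpre
      rcases Bool.and_eq_true_iff.mp hpre with ⟨hab, -⟩
      have hb : b ≠ '\n' := by
        rw [← beq_iff_eq.mp hab]
        exact fun hh => hnl (hh ▸ List.mem_cons_self)
      simp [pvLstripNl, List.dropWhile_cons, hb]

-- the heart: A's per-line loop over the split equals the newline-jumping search
theorem pvScan_eq (n : Nat) (cs : List Char) (hlen : cs.length ≤ n)
    (hg : ∀ c ∈ cs, pvGoodChar c = true) :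
    pvAScan (pvSplitAux [] cs) = (pvBSearch cs).map pvLstripNl := by
  induction n generalizing cs with
  | zero =>
    have hnil : cs = [] := List.length_eq_zero_iff.mp (Nat.le_zero.mp hlen)
    subst hnil
    rw [pvBSearch_neg_nil [] (by decide) (by decide)]
    decide
  | succ n ih =>
    by_cases hmem : '\n' ∈ cs
    · have hdne : cs.dropWhile (fun c => c != '\n') ≠ [] := by
        intro hd
        have := List.dropWhile_eq_nil_iff.mp hd _ hmem
        simp at this
      cases hd : cs.dropWhile (fun c => c != '\n') with
      | nil => exact absurd hd hdne
      | cons c0 rest =>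
        have hc0 : c0 = '\n' := by
          have h1 : cs.dropWhile (fun c => c != '\n') ≠ [] := by simp [hd]
          have hp := List.head_dropWhile_not (fun c => c != '\n') h1
          have h2 : (cs.dropWhile (fun c => c != '\n')).head h1 = c0 := by simp [hd]
          rw [h2] at hp; simpa using hp
        subst hc0
        set l := cs.takeWhile (fun c => c != '\n') with hl
        have hcs : cs = l ++ '\n' :: rest := by
          rw [hl, ← hd, List.takeWhile_append_dropWhile]
        have hnl : '\n' ∉ l := by
          intro hm
          have := List.mem_takeWhile_imp hm
          simp at this
        have hgl : ∀ c ∈ l, pvGoodChar c = true := fun c hc =>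
          hg c (hcs ▸ List.mem_append_left _ hc)
        have hgr : ∀ c ∈ rest, pvGoodChar c = true := fun c hc =>
          hg c (hcs ▸ List.mem_append_right _ (List.mem_cons_of_mem _ hc))
        have hlenr : rest.length ≤ n := by
          have := hlen
          rw [hcs, List.length_append, List.length_cons] at this
          omega
        rw [hcs, pvSplitAux_append [] l rest hnl, List.reverse_nil, List.nil_append]
        cases hm : pvMatchHere l with
        | true =>
          rcases pvLineCond_of_match l hm with ⟨h1, h2, h3⟩
          rw [pvAScan_cons, if_neg h1, if_pos (by rw [h2, h3]; rfl)]
          have hjoin : PySem.Chars.join ['\n'] (l :: pvSplitAux [] rest) = l ++ '\n' :: rest := by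
            have := pvJoin_splitAux [] (l ++ '\n' :: rest)
            rw [pvSplitAux_append [] l rest hnl] at this
            simpa using this
          rw [hjoin]
          have hmcs : pvMatchHere (l ++ '\n' :: rest) = true := by
            rcases List.any_eq_true.mp hm with ⟨p, hp, hpre⟩
            exact List.any_eq_true.mpr ⟨p, hp, List.isPrefixOf_iff_prefix.mpr
              ((List.isPrefixOf_iff_prefix.mp hpre).trans (List.prefix_append _ _))⟩
          rw [pvBSearch_pos _ hmcs]
          rfl
        | false =>
          have hmcs : pvMatchHere (l ++ '\n' :: rest) = false := by
            cases hx : pvMatchHere (l ++ '\n' :: rest) with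
            | false => rfl
            | true =>
              rcases List.any_eq_true.mp hx with ⟨p, hp, hpre⟩
              rcases pvPrefixes_facts p hp with ⟨-, hnp, -⟩
              have := pvPrefix_through_newline p l rest hnp hpre
              have hmt : pvMatchHere l = true := List.any_eq_true.mpr ⟨p, hp, this⟩
              rw [hmt] at hm
              exact absurd hm (by simp)
          have hdrop : (l ++ '\n' :: rest).dropWhile (fun c => c != '\n') = '\n' :: rest := by
            rw [← hcs]; exact hd
          rw [pvBSearch_neg_cons _ _ _ hmcs hdrop]
          rw [pvAScan_cons]
          by_cases hs : PySem.Chars.strip l = []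
          · rw [if_pos hs]
            exact ih rest hlenr hgr
          · rw [if_neg hs, if_neg ?hcond]
            case hcond =>
              intro hc
              rw [pvMatch_of_cond l hnl hgl hc] at hm
              exact absurd hm (by simp)
            exact ih rest hlenr hgr
    · rw [pvSplitAux_no_nl [] cs hmem, List.reverse_nil, List.nil_append]
      cases hm : pvMatchHere cs with
      | true =>
        rcases pvLineCond_of_match cs hm with ⟨h1, h2, h3⟩
        rw [pvAScan_cons, if_neg h1, if_pos (by rw [h2, h3]; rfl)]
        rw [PySem.Chars.join_singleton, pvBSearch_pos _ hm]
        rfl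
      | false =>
        have hdrop : cs.dropWhile (fun c => c != '\n') = [] := by
          rw [List.dropWhile_eq_nil_iff]
          intro x hx
          simp only [bne_iff_ne, ne_eq]
          exact fun hh => hmem (hh ▸ hx)
        rw [pvBSearch_neg_nil _ hm hdrop]
        rw [pvAScan_cons]
        by_cases hs : PySem.Chars.strip cs = []
        · rw [if_pos hs]; rfl
        · rw [if_neg hs, if_neg ?hcond2]
          case hcond2 =>
            intro hc
            rw [pvMatch_of_cond cs hmem hg hc] at hm
            exact absurd hm (by simp)
          rfl

-- ===== VERDICT (by name: the statement is the Claim_ definition above) =====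
theorem trim_to_first_standalone_block_py_spec : Claim_equal_trim_to_first_standalone_block_py := by
  intro source hdom
  unfold Spec_trim_to_first_standalone_block_py
  unfold trim_to_first_standalone_block_py trim_to_first_standalone_block_py_alt
  have hdom' : ∀ c ∈ source.toList, pvDomChar c = true := by
    intro c hc
    exact List.all_eq_true.mp hdom c hc
  have h1 : pvAScan (pvSplitSourceLines source.toList)
      = (pvBSearch (pvNormalize source.toList)).map pvLstripNl := by
    rw [pvSplitSourceLines, pvSplitOn_nl_eq]
    exact pvScan_eq (pvNormalize source.toList).length _ (le_refl _)
      (pvNormalize_good source.toList hdom')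
  have hdom2 : ∀ c ∈ pvDedentSource source.toList, pvDomChar c = true := by
    intro c hc
    rcases pvMem_dedentSource source.toList c hc with h | h
    · exact hdom' c h
    · subst h; decide
  have h2 : pvAScan (pvSplitSourceLines (pvDedentSource source.toList))
      = (pvBSearch (pvNormalize (pvDedentSource source.toList))).map pvLstripNl := by
    rw [pvSplitSourceLines, pvSplitOn_nl_eq]
    exact pvScan_eq (pvNormalize (pvDedentSource source.toList)).length _ (le_refl _)
      (pvNormalize_good _ hdom2)
  rw [h1, h2, pvFindBlock_eq, pvFindBlock_eq]
  cases hb1 : pvBSearch (pvNormalize source.toList) with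
  | some t =>
    simp only [Option.map_some]
    rw [pvLstripNl_of_match t (pvBSearch_matches _ _ hb1)]
  | none =>
    simp only [Option.map_none]
    cases hb2 : pvBSearch (pvNormalize (pvDedentSource source.toList)) with
    | some t =>
      simp only [Option.map_some]
      rw [pvLstripNl_of_match t (pvBSearch_matches _ _ hb2)]
    | none => rfl
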